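-- pv_equiv track=rewrite | github.com/rupol/Hash-Tables-Lecture | src/ht3/letter_count.py | double_letter
-- ===== SOURCE A (Python) =====
-- def double_letter(string):
--     # store letters as keys, count as value
--     d = set()
--     for char in string:
--         if char.isspace():
--             continue
--         if char not in d:
--             d.add(char)
--         else:
--             return char
-- ===== SOURCE B (Python) =====
-- def double_letter(string):
--     # pick, among the distinct non-space characters, the one whose SECOND
--     # occurrence comes earliest; found via str.find rather than a seen-set scan
--     best = None  # (second_occurrence_index, char)
--     for c in dict.fromkeys(string):
--         if c.isspace():
--             continue
--         j = string.find(c, string.find(c) + 1)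
--         if j != -1 and (best is None or j < best[0]):
--             best = (j, c)
--     return best[1] if best is not None else None
-- ===== Notes on version B (the rewrite author's own statement) =====
-- stated objective: alternative
-- what changed: Instead of A's streaming seen-set scan that returns at the first repeat, B iterates over the distinct characters, locates each non-space character's second occurrence with str.find(c, first+1), and returns the character whose second occurrence index is smallest.
import Mathlib
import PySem

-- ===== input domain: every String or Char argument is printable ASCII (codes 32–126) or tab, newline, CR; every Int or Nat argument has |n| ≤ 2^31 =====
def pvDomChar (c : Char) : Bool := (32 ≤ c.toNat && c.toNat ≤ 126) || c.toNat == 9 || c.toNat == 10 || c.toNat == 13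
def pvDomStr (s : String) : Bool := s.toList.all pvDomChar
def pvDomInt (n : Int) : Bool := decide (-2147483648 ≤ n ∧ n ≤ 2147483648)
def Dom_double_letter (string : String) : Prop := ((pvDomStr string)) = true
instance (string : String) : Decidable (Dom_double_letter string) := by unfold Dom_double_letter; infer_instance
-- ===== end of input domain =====

-- B replaces A's streaming seen-set scan by a per-character selection: for each distinct
-- non-space character it locates the second occurrence with str.find and keeps the one
-- whose second occurrence comes earliest (alternative algorithm, no speed claim).

-- ===== PORT A =====
-- loop over the characters carrying the set d
def double_letter_go (cs : List Char) (d : PySem.Set Char) : Option String :=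
  match cs with
  | [] => none
  | c :: rest =>
    if PySem.Chars.isspace c then double_letter_go rest d
    else if ¬ (PySem.Set.contains d c) then double_letter_go rest (PySem.Set.add d c)
    else some (String.ofList [c])

def double_letter (string : String) : Option String :=
  double_letter_go string.toList PySem.Set.empty

-- ===== PORT B =====
-- j = string.find(c, string.find(c) + 1): index of the second occurrence of c, or -1
def pvSecondIdx (s : List Char) (c : Char) : Int :=
  PySem.Chars.findFrom s [c] (PySem.Chars.find s [c] + 1) none

-- loop body: keep (j, c) iff c is non-space, has a second occurrence, and improves best
def pvAltStep (s : List Char) (best : Option (Int × Char)) (c : Char) : Option (Int × Char) :=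
  if PySem.Chars.isspace c then best
  else
    let j := pvSecondIdx s c
    if j != -1 && (match best with | none => true | some b => decide (j < b.1)) then
      some (j, c)
    else best

def double_letter_alt (string : String) : Option String :=
  match (PySem.List.dedup string.toList).foldl (pvAltStep string.toList) none with
  | some b => some (String.ofList [b.2])
  | none => none

-- ===== PRECONDITION & SPEC =====
def Spec_double_letter (string : String) (out : Option String) : Prop := out = double_letter_alt string
instance (string : String) (out : Option String) : Decidable (Spec_double_letter string out) := by unfold Spec_double_letter; infer_instance

-- ===== CLAIM (what is proved, stated in full; the proofs are below) =====
def Claim_equal_double_letter : Prop := ∀ (string : String), Dom_double_letter string → Spec_double_letter string (double_letter string)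

-- ===== LEMMAS AND PROOFS =====

-- 'position i is a repeat': s[i] is non-space and already occurs in s.take i
def pvQ (s : List Char) (i : Nat) : Bool :=
  match s[i]? with
  | some c => !(PySem.Chars.isspace c) && (s.take i).contains c
  | none => false

-- 'i is an occurrence of c that has an earlier occurrence'
def pvP2 (s : List Char) (c : Char) (i : Nat) : Bool :=
  (s[i]? == some c) && (s.take i).contains c

theorem pv_prefix_single (c : Char) (l : List Char) : [c] <+: l ↔ l[0]? = some c := by
  cases l with
  | nil => simp
  | cons x xs => simp [List.cons_prefix_cons, eq_comm]

theorem pv_prefix_drop (c : Char) (s : List Char) (i : Nat) :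
    [c] <+: s.drop i ↔ s[i]? = some c := by
  rw [pv_prefix_single]
  simp [List.getElem?_drop]

theorem pv_mem_take (c : Char) (s : List Char) (i : Nat) :
    c ∈ s.take i ↔ ∃ j, j < i ∧ s[j]? = some c := by
  simp only [List.mem_iff_getElem?, List.getElem?_take]
  constructor
  · rintro ⟨n, hn⟩
    by_cases h : n < i
    · exact ⟨n, h, by simpa [h] using hn⟩
    · simp [h] at hn
  · rintro ⟨j, hj, hjc⟩
    exact ⟨j, by simp [hj, hjc]⟩

theorem pv_infix_single (c : Char) (s : List Char) : [c] <:+: s ↔ c ∈ s := by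
  constructor
  · intro h
    have := (PySem.Chars.isIn_iff_infix (sub := [c]) (s := s)).mpr h
    rcases (PySem.Chars.exists_prefix_drop_iff_isIn (sub := [c]) (s := s)).mpr this with ⟨j, hj⟩
    exact List.mem_iff_getElem?.mpr ⟨j, (pv_prefix_drop c s j).mp hj⟩
  · intro h
    rcases List.mem_iff_getElem?.mp h with ⟨j, hj⟩
    apply (PySem.Chars.isIn_iff_infix (sub := [c]) (s := s)).mp
    apply (PySem.Chars.exists_prefix_drop_iff_isIn (sub := [c]) (s := s)).mp
    exact ⟨j, (pv_prefix_drop c s j).mpr hj⟩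

theorem pvP2_true_iff (s : List Char) (c : Char) (i : Nat) :
    pvP2 s c i = true ↔ s[i]? = some c ∧ c ∈ s.take i := by
  simp [pvP2]

theorem pvP2_false_iff (s : List Char) (c : Char) (i : Nat) :
    pvP2 s c i = false ↔ ¬(s[i]? = some c ∧ c ∈ s.take i) := by
  rw [← pvP2_true_iff]
  simp

theorem pvQ_true_iff (s : List Char) (i : Nat) :
    pvQ s i = true ↔ ∃ ch, s[i]? = some ch ∧ PySem.Chars.isspace ch = false ∧ ch ∈ s.take i := by
  unfold pvQ
  cases h : s[i]? with
  | none => simp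
  | some c => simp

-- the second-occurrence index computed by B is exactly the least i with pvP2
theorem pvSecondIdx_cases (s : List Char) (c : Char) :
    (pvSecondIdx s c = -1 ∧ ∀ i, pvP2 s c i = false) ∨
    (∃ n : Nat, pvSecondIdx s c = (n : Int) ∧ pvP2 s c n = true ∧
      ∀ i < n, pvP2 s c i = false) := by
  unfold pvSecondIdx
  by_cases hmem : c ∈ s
  · have hfnn : 0 ≤ PySem.Chars.find s [c] :=
      (PySem.Chars.find_nonneg_iff _ _).mpr ((pv_infix_single c s).mpr hmem)
    obtain ⟨hpre, hminf⟩ := PySem.Chars.find_spec (s := s) (sub := [c]) hfnn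
    have hocc : s[(PySem.Chars.find s [c]).toNat]? = some c := (pv_prefix_drop _ _ _).mp hpre
    have hfirst : ∀ j, s[j]? = some c → (PySem.Chars.find s [c]).toNat ≤ j := by
      intro j hj
      by_contra h
      exact hminf j (by omega) ((pv_prefix_drop c s j).mpr hj)
    have hlt : (PySem.Chars.find s [c]).toNat < s.length := by
      by_contra h
      rw [List.getElem?_eq_none (by omega)] at hocc
      simp at hocc
    set k : Nat := (PySem.Chars.find s [c]).toNat + 1 with hk
    have hkle : k ≤ s.length := by omega
    have hcast : PySem.Chars.find s [c] + 1 = (k : Int) := by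
      have := Int.toNat_of_nonneg hfnn
      omega
    rw [hcast, PySem.Chars.findFrom_natCast s [c] k hkle]
    by_cases h2 : PySem.Chars.find (s.drop k) [c] = -1
    · left
      have hnomem : c ∉ s.drop k := by
        rw [← pv_infix_single]
        exact (PySem.Chars.find_eq_neg_one_iff _ _).mp h2
      refine ⟨by rw [if_pos h2], ?_⟩
      intro i
      rw [pvP2_false_iff]
      rintro ⟨hic, hitake⟩
      rcases (pv_mem_take c s i).mp hitake with ⟨j, hji, hjc⟩
      have hjf := hfirst j hjc
      have hik : k ≤ i := by omega
      apply hnomem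
      apply List.mem_iff_getElem?.mpr
      refine ⟨i - k, ?_⟩
      rw [List.getElem?_drop]
      rw [show k + (i - k) = i by omega]
      exact hic
    · right
      have hgnn : 0 ≤ PySem.Chars.find (s.drop k) [c] := by
        have := PySem.Chars.neg_one_le_find (s := s.drop k) (sub := [c])
        omega
      obtain ⟨hpre2, hmin2⟩ := PySem.Chars.find_spec (s := s.drop k) (sub := [c]) hgnn
      have hocc2 : (s.drop k)[(PySem.Chars.find (s.drop k) [c]).toNat]? = some c :=
        (pv_prefix_drop _ _ _).mp hpre2
      refine ⟨k + (PySem.Chars.find (s.drop k) [c]).toNat, ?_, ?_, ?_⟩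
      · rw [if_neg h2]
        have := Int.toNat_of_nonneg hgnn
        omega
      · rw [pvP2_true_iff]
        constructor
        · rw [← List.getElem?_drop]
          exact hocc2
        · exact (pv_mem_take c s _).mpr ⟨(PySem.Chars.find s [c]).toNat, by omega, hocc⟩
      · intro i hi
        rw [pvP2_false_iff]
        rintro ⟨hic, hitake⟩
        rcases (pv_mem_take c s i).mp hitake with ⟨j, hji, hjc⟩
        have hjf := hfirst j hjc
        have hik : k ≤ i := by omega
        apply hmin2 (i - k) (by omega)
        rw [pv_prefix_drop]
        rw [List.getElem?_drop]
        rw [show k + (i - k) = i by omega]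
        exact hic
  · left
    have hf1 : PySem.Chars.find s [c] = -1 := by
      rw [PySem.Chars.find_eq_neg_one_iff]
      rw [pv_infix_single]
      exact hmem
    constructor
    · rw [hf1, show (-1 : Int) + 1 = 0 by norm_num]
      rw [show (0 : Int) = ((0 : Nat) : Int) by norm_num]
      rw [PySem.Chars.findFrom_natCast s [c] 0 (by omega)]
      simp [hf1]
    · intro i
      rw [pvP2_false_iff]
      rintro ⟨hic, -⟩
      exact hmem (List.mem_iff_getElem?.mpr ⟨i, hic⟩)

-- ---- A-side characterisation ----

theorem pvA_go_none (s : List Char) :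
    ∀ (rest : List Char) (k : Nat) (d : PySem.Set Char),
      s.drop k = rest →
      (∀ x, PySem.Chars.isspace x = false → PySem.Set.contains d x = (s.take k).contains x) →
      (∀ i, k ≤ i → pvQ s i = false) →
      double_letter_go rest d = none := by
  intro rest
  induction rest with
  | nil => intro k d _ _ _; rfl
  | cons c rest' ih =>
    intro k d hdrop inv hQ
    have hsk : s[k]? = some c := by
      have h0 : (s.drop k)[0]? = s[k]? := by simp [List.getElem?_drop]
      rw [hdrop] at h0
      simpa using h0.symm
    have hdrop' : s.drop (k + 1) = rest' := by
      have := congrArg (List.drop 1) hdrop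
      rw [List.drop_drop] at this
      simpa [Nat.add_comm] using this
    have htake : s.take (k + 1) = s.take k ++ [c] := by
      rw [List.take_add_one, hsk]
      rfl
    unfold double_letter_go
    by_cases hs : PySem.Chars.isspace c = true
    · simp only [hs, if_true]
      apply ih (k + 1) d hdrop'
      · intro x hx
        have hne : x ≠ c := by
          intro e
          rw [e, hs] at hx
          exact absurd hx (by simp)
        rw [inv x hx, htake]
        simp [hne]
      · intro i hi
        exact hQ i (by omega)
    · have hs' : PySem.Chars.isspace c = false := by simpa using hs
      have hQk := hQ k (le_refl k)
      have hctake : (s.take k).contains c = false := by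
        unfold pvQ at hQk
        rw [hsk] at hQk
        simpa [hs'] using hQk
      have hdc : PySem.Set.contains d c = false := by rw [inv c hs', hctake]
      simp only [hs', if_false, Bool.false_eq_true, hdc, not_false_iff, if_true]
      have hadd : PySem.Set.add d c = d ++ [c] := by
        simp [PySem.Set.add, PySem.Set.contains] at hdc ⊢
        simp [hdc]
      apply ih (k + 1) (PySem.Set.add d c) hdrop'
      · intro x hx
        rw [hadd, htake]
        have hi := inv x hx
        simp [PySem.Set.contains] at hi ⊢
        simp [hi]
      · intro i hi
        exact hQ i (by omega)

theorem pvA_go_some (s : List Char) (i₀ : Nat) (c₀ : Char)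
    (hc₀ : s[i₀]? = some c₀) (hq : pvQ s i₀ = true)
    (hmin : ∀ i < i₀, pvQ s i = false) :
    ∀ (rest : List Char) (k : Nat) (d : PySem.Set Char),
      s.drop k = rest → k ≤ i₀ →
      (∀ x, PySem.Chars.isspace x = false → PySem.Set.contains d x = (s.take k).contains x) →
      double_letter_go rest d = some (String.ofList [c₀]) := by
  intro rest
  induction rest with
  | nil =>
    intro k d hdrop hki inv
    exfalso
    have hlen : s.length ≤ k := List.drop_eq_nil_iff.mp hdrop
    have : i₀ < s.length := by
      by_contra h
      rw [List.getElem?_eq_none (by omega)] at hc₀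
      simp at hc₀
    omega
  | cons c rest' ih =>
    intro k d hdrop hki inv
    have hsk : s[k]? = some c := by
      have h0 : (s.drop k)[0]? = s[k]? := by simp [List.getElem?_drop]
      rw [hdrop] at h0
      simpa using h0.symm
    have hdrop' : s.drop (k + 1) = rest' := by
      have := congrArg (List.drop 1) hdrop
      rw [List.drop_drop] at this
      simpa [Nat.add_comm] using this
    have htake : s.take (k + 1) = s.take k ++ [c] := by
      rw [List.take_add_one, hsk]
      rfl
    unfold double_letter_go
    by_cases hke : k = i₀
    · subst hke
      have hcc : c = c₀ := by
        rw [hsk] at hc₀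
        exact Option.some.inj hc₀
      subst hcc
      unfold pvQ at hq
      rw [hsk] at hq
      simp only [Bool.and_eq_true, Bool.not_eq_true'] at hq
      obtain ⟨hs', hctake⟩ := hq
      have hdc : PySem.Set.contains d c = true := by rw [inv c hs', hctake]
      have hmemd : c ∈ d := by simpa [PySem.Set.contains] using hdc
      simp [hs', hmemd]
    · have hklt : k < i₀ := by omega
      have hQk := hmin k hklt
      by_cases hs : PySem.Chars.isspace c = true
      · simp only [hs, if_true]
        apply ih (k + 1) d hdrop' (by omega)
        intro x hx
        have hne : x ≠ c := by
          intro e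
          rw [e, hs] at hx
          exact absurd hx (by simp)
        rw [inv x hx, htake]
        simp [hne]
      · have hs' : PySem.Chars.isspace c = false := by simpa using hs
        have hctake : (s.take k).contains c = false := by
          unfold pvQ at hQk
          rw [hsk] at hQk
          simpa [hs'] using hQk
        have hdc : PySem.Set.contains d c = false := by rw [inv c hs', hctake]
        simp only [hs', if_false, Bool.false_eq_true, hdc, not_false_iff, if_true]
        have hadd : PySem.Set.add d c = d ++ [c] := by
          simp [PySem.Set.add, PySem.Set.contains] at hdc ⊢
          simp [hdc]
        apply ih (k + 1) (PySem.Set.add d c) hdrop' (by omega)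
        intro x hx
        rw [hadd, htake]
        have hi := inv x hx
        simp [PySem.Set.contains] at hi ⊢
        simp [hi]

-- ---- B-side fold characterisation ----

theorem pvFold_none (s : List Char)
    (h : ∀ c, PySem.Chars.isspace c = false → pvSecondIdx s c = -1) :
    ∀ L : List Char, L.foldl (pvAltStep s) none = none := by
  intro L
  induction L with
  | nil => rfl
  | cons c L' ih =>
    have hstep : pvAltStep s none c = none := by
      by_cases hs : PySem.Chars.isspace c = true
      · simp [pvAltStep, hs]
      · have hs' : PySem.Chars.isspace c = false := by simpa using hs
        simp [pvAltStep, hs', h c hs']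
    simpa [List.foldl_cons, hstep] using ih

theorem pvFold_min (s : List Char) (i₀ : Nat) (c₀ : Char)
    (hsp : PySem.Chars.isspace c₀ = false)
    (hidx : pvSecondIdx s c₀ = (i₀ : Int)) :
    ∀ (L : List Char) (acc : Option (Int × Char)),
      (∀ c ∈ L, PySem.Chars.isspace c = false → pvSecondIdx s c ≠ -1 →
        c = c₀ ∨ (i₀ : Int) < pvSecondIdx s c) →
      (c₀ ∈ L ∨ acc = some ((i₀ : Int), c₀)) →
      (acc = some ((i₀ : Int), c₀) ∨ acc = none ∨
        ∃ j ch, acc = some (j, ch) ∧ (i₀ : Int) < j) →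
      L.foldl (pvAltStep s) acc = some ((i₀ : Int), c₀) := by
  intro L
  induction L with
  | nil =>
    intro acc hall hmem hinv
    rcases hmem with hmem | hmem
    · simp at hmem
    · simpa using hmem
  | cons c L' ih =>
    intro acc hall hmem hinv
    rw [List.foldl_cons]
    by_cases hs : PySem.Chars.isspace c = true
    · have hstep : pvAltStep s acc c = acc := by simp [pvAltStep, hs]
      rw [hstep]
      apply ih
      · intro x hx; exact hall x (List.mem_cons_of_mem c hx)
      · rcases hmem with hmem | hmem
        · rcases List.mem_cons.mp hmem with he | hm
          · exfalso; rw [he, hs] at hsp; simp at hsp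
          · exact Or.inl hm
        · exact Or.inr hmem
      · exact hinv
    · have hs' : PySem.Chars.isspace c = false := by simpa using hs
      by_cases hcc : c = c₀
      · subst hcc
        have hstep : pvAltStep s acc c = some ((i₀ : Int), c) := by
          rcases hinv with hinv | hinv | ⟨j, ch, hacc, hj⟩
          · rw [hinv]
            simp [pvAltStep, hs', hidx]
          · rw [hinv]
            have : (i₀ : Int) ≠ -1 := by omega
            simp [pvAltStep, hs', hidx, this]
          · rw [hacc]
            have hne : (i₀ : Int) ≠ -1 := by omega
            simp [pvAltStep, hs', hidx, hne, hj]
        rw [hstep]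
        apply ih
        · intro x hx; exact hall x (List.mem_cons_of_mem c hx)
        · exact Or.inr rfl
        · exact Or.inl rfl
      · have hc' := hall c List.mem_cons_self hs'
        by_cases hneg : pvSecondIdx s c = -1
        · have hstep : pvAltStep s acc c = acc := by simp [pvAltStep, hs', hneg]
          rw [hstep]
          apply ih
          · intro x hx; exact hall x (List.mem_cons_of_mem c hx)
          · rcases hmem with hmem | hmem
            · rcases List.mem_cons.mp hmem with he | hm
              · exact absurd he.symm hcc
              · exact Or.inl hm
            · exact Or.inr hmem
          · exact hinv
        · have hgt : (i₀ : Int) < pvSecondIdx s c := by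
            rcases hc' hneg with he | hgt
            · exact absurd he hcc
            · exact hgt
          have hmem2 : c₀ ∈ L' ∨ pvAltStep s acc c = some ((i₀ : Int), c₀) := by
            rcases hmem with hmem | hmem
            · rcases List.mem_cons.mp hmem with he | hm
              · exact absurd he.symm hcc
              · exact Or.inl hm
            · right
              rw [hmem]
              have hnotlt : ¬ pvSecondIdx s c < (i₀ : Int) := by omega
              simp [pvAltStep, hs', hnotlt]
          have hinv' : pvAltStep s acc c = some ((i₀ : Int), c₀) ∨ pvAltStep s acc c = none ∨
              ∃ j ch, pvAltStep s acc c = some (j, ch) ∧ (i₀ : Int) < j := by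
            rcases hinv with hinv | hinv | ⟨j, ch, hacc, hj⟩
            · left
              rw [hinv]
              have hnotlt : ¬ pvSecondIdx s c < (i₀ : Int) := by omega
              simp [pvAltStep, hs', hnotlt]
            · right; right
              rw [hinv]
              refine ⟨pvSecondIdx s c, c, ?_, hgt⟩
              simp [pvAltStep, hs', hneg]
            · right; right
              rw [hacc]
              by_cases hlt : pvSecondIdx s c < j
              · refine ⟨pvSecondIdx s c, c, ?_, hgt⟩
                simp [pvAltStep, hs', hneg, hlt]
              · refine ⟨j, ch, ?_, hj⟩
                simp [pvAltStep, hs', hlt]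
          apply ih
          · intro x hx; exact hall x (List.mem_cons_of_mem c hx)
          · exact hmem2
          · exact hinv'

-- ===== VERDICT (by name: the statement is the Claim_ definition above) =====
theorem double_letter_spec : Claim_equal_double_letter := by
  intro str _
  unfold Spec_double_letter double_letter double_letter_alt
  by_cases h : ∃ i, pvQ str.toList i = true
  · -- there is a repeat; let i₀ be the least repeat position
    classical
    obtain ⟨i₀, hQ, hmin⟩ :
        ∃ i₀, pvQ str.toList i₀ = true ∧ ∀ i < i₀, pvQ str.toList i = false := by
      refine ⟨Nat.find h, Nat.find_spec h, ?_⟩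
      intro i hi
      have := Nat.find_min h hi
      simpa using this
    obtain ⟨c₀, hc₀, hsp, htake⟩ := (pvQ_true_iff _ _).mp hQ
    have hP2 : pvP2 str.toList c₀ i₀ = true := (pvP2_true_iff _ _ _).mpr ⟨hc₀, htake⟩
    -- B's second-occurrence index of c₀ is exactly i₀
    have hidx : pvSecondIdx str.toList c₀ = (i₀ : Int) := by
      rcases pvSecondIdx_cases str.toList c₀ with ⟨-, hall⟩ | ⟨n, hn, hPn, hnmin⟩
      · rw [hall i₀] at hP2; simp at hP2
      · obtain ⟨hnc, hntake⟩ := (pvP2_true_iff _ _ _).mp hPn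
        have hQn : pvQ str.toList n = true := (pvQ_true_iff _ _).mpr ⟨c₀, hnc, hsp, hntake⟩
        have h1 : ¬ n < i₀ := by
          intro hlt
          rw [hmin n hlt] at hQn
          simp at hQn
        have h2 : ¬ i₀ < n := by
          intro hlt
          rw [hnmin i₀ hlt] at hP2
          simp at hP2
        have : n = i₀ := by omega
        rw [hn, this]
    -- A returns c₀
    rw [pvA_go_some str.toList i₀ c₀ hc₀ hQ hmin str.toList 0 PySem.Set.empty
      (by simp) (by omega) (by intro x _; simp [PySem.Set.empty, PySem.Set.contains])]
    -- B's fold selects (i₀, c₀)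
    have hfold : (PySem.List.dedup str.toList).foldl (pvAltStep str.toList) none =
        some ((i₀ : Int), c₀) := by
      apply pvFold_min str.toList i₀ c₀ hsp hidx
      · intro c hcmem hcs hcne
        rcases pvSecondIdx_cases str.toList c with ⟨hneg, -⟩ | ⟨n, hn, hPn, -⟩
        · exact absurd hneg hcne
        · obtain ⟨hnc, hntake⟩ := (pvP2_true_iff _ _ _).mp hPn
          have hQn : pvQ str.toList n = true := (pvQ_true_iff _ _).mpr ⟨c, hnc, hcs, hntake⟩
          have hge : ¬ n < i₀ := by
            intro hlt
            rw [hmin n hlt] at hQn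
            simp at hQn
          by_cases he : n = i₀
          · left
            rw [he] at hnc
            rw [hnc] at hc₀
            exact Option.some.inj hc₀
          · right
            rw [hn]
            exact_mod_cast by omega
      · left
        apply (PySem.List.mem_dedup _ _).mpr
        exact List.mem_iff_getElem?.mpr ⟨i₀, hc₀⟩
      · exact Or.inr (Or.inl rfl)
    rw [hfold]
  · -- no repeat: both return none
    rw [not_exists] at h
    have hfalse : ∀ i, pvQ str.toList i = false := by
      intro i
      have := h i
      simpa using this
    rw [pvA_go_none str.toList str.toList 0 PySem.Set.empty (by simp)
      (by intro x _; simp [PySem.Set.empty, PySem.Set.contains]) (fun i _ => hfalse i)]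
    have hnone : ∀ c, PySem.Chars.isspace c = false → pvSecondIdx str.toList c = -1 := by
      intro c hcs
      rcases pvSecondIdx_cases str.toList c with ⟨hneg, -⟩ | ⟨n, hn, hPn, -⟩
      · exact hneg
      · exfalso
        obtain ⟨hnc, hntake⟩ := (pvP2_true_iff _ _ _).mp hPn
        have hQn : pvQ str.toList n = true := (pvQ_true_iff _ _).mpr ⟨c, hnc, hcs, hntake⟩
        rw [hfalse n] at hQn
        simp at hQn
    rw [pvFold_none str.toList hnone]
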